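-- pv_equiv track=rewrite | github.com/toddheckmann/wsc | milanintel/collectors/jobs.py | _looks_like_job_url
-- ===== SOURCE A (Python) =====
-- def _looks_like_job_url(url: str) -> bool:
--     """Check if URL looks like a job listing."""
--     url_lower = url.lower()
--     job_patterns = [
--         '/job/', '/jobs/', '/career/', '/careers/',
--         '/position/', '/positions/', '/opening/', '/openings/',
--         'requisition', 'posting', 'opportunity'
--     ]
--     return any(pattern in url_lower for pattern in job_patterns)
-- ===== SOURCE B (Python) =====
-- def _looks_like_job_url(url: str) -> bool:
--     """Check if URL looks like a job listing (single left-to-right scan)."""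
--     patterns = (
--         '/job/', '/jobs/', '/career/', '/careers/',
--         '/position/', '/positions/', '/opening/', '/openings/',
--         'requisition', 'posting', 'opportunity',
--     )
--     u = url.lower()
--     for i in range(len(u)):
--         if any(u.startswith(p, i) for p in patterns):
--             return True
--     return False
-- ===== Notes on version B (the rewrite author's own statement) =====
-- stated objective: alternative
-- what changed: Instead of running an independent full substring search per pattern, B makes one left-to-right scan over the lowercased URL and at each position checks whether any pattern starts there, returning True at the first hit.
import Mathlib
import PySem

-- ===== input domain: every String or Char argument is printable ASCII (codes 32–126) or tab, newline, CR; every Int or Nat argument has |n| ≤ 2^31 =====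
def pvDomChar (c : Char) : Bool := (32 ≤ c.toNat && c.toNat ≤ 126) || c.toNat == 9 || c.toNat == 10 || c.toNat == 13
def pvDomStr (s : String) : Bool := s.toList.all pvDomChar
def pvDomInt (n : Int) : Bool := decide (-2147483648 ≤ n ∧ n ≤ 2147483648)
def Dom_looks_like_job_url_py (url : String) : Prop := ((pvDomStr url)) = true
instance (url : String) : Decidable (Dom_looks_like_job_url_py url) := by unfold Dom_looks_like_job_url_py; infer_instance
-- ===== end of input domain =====

-- B replaces the per-pattern independent substring searches with one left-to-right scan
-- checking at each position whether any pattern starts there (objective: alternative).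

-- ===== PORT A =====
-- literal transliteration of _looks_like_job_url: lower the url, then
-- any(pattern in url_lower for pattern in job_patterns)
def looks_like_job_url_py (url : String) : Bool :=
  let url_lower := PySem.Str.lower url
  let job_patterns : List String :=
    ["/job/", "/jobs/", "/career/", "/careers/",
     "/position/", "/positions/", "/opening/", "/openings/",
     "requisition", "posting", "opportunity"]
  job_patterns.any (fun pattern => PySem.Str.isIn pattern url_lower)

-- ===== PORT B =====
-- the tuple of patterns, as lists of chars
def jobPatterns : List (List Char) :=
  ["/job/".toList, "/jobs/".toList, "/career/".toList, "/careers/".toList,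
   "/position/".toList, "/positions/".toList, "/opening/".toList, "/openings/".toList,
   "requisition".toList, "posting".toList, "opportunity".toList]

-- the scan loop: for each position i (i.e. each nonempty suffix), check whether
-- some pattern starts there (u.startswith(p, i)); stop at the first hit
def jobScan : List Char → Bool
  | [] => false
  | c :: rest =>
    if jobPatterns.any (fun p => PySem.Chars.startswith (c :: rest) p) then true
    else jobScan rest

def looks_like_job_url_py_alt (url : String) : Bool :=
  jobScan (PySem.Chars.lower url.toList)

-- ===== PRECONDITION & SPEC =====
def Spec_looks_like_job_url_py (url : String) (out : Bool) : Prop := out = looks_like_job_url_py_alt url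
instance (url : String) (out : Bool) : Decidable (Spec_looks_like_job_url_py url out) := by unfold Spec_looks_like_job_url_py; infer_instance

-- ===== CLAIM (what is proved, stated in full; the proofs are below) =====
def Claim_equal_looks_like_job_url_py : Prop := ∀ (url : String), Dom_looks_like_job_url_py url → Spec_looks_like_job_url_py url (looks_like_job_url_py url)

-- ===== LEMMAS AND PROOFS =====

-- every pattern is nonempty (so a pattern is never a prefix of the empty suffix)
theorem jobPatterns_ne_nil : ∀ p ∈ jobPatterns, p ≠ [] := by decide

-- the scan finds a hit iff some pattern is a prefix of some suffix
theorem jobScan_iff (cs : List Char) :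
    jobScan cs = true ↔ ∃ p ∈ jobPatterns, ∃ j, p <+: cs.drop j := by
  induction cs with
  | nil =>
    simp only [jobScan, List.drop_nil, Bool.false_eq_true, false_iff]
    rintro ⟨p, hp, _, hpre⟩
    exact jobPatterns_ne_nil p hp (List.prefix_nil.mp hpre)
  | cons c rest ih =>
    simp only [jobScan]
    constructor
    · intro h
      split at h
      · rename_i hany
        obtain ⟨p, hp, hpre⟩ := List.any_eq_true.mp hany
        exact ⟨p, hp, 0, by simpa [PySem.Chars.startswith_iff] using hpre⟩
      · obtain ⟨p, hp, j, hpre⟩ := ih.mp h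
        exact ⟨p, hp, j + 1, by simpa using hpre⟩
    · rintro ⟨p, hp, j, hpre⟩
      split
      · rfl
      · rename_i hany
        cases j with
        | zero =>
          exact absurd (List.any_eq_true.mpr ⟨p, hp, (PySem.Chars.startswith_iff _ _).mpr (by simpa using hpre)⟩) hany
        | succ j' =>
          exact ih.mpr ⟨p, hp, j', by simpa using hpre⟩

-- jobPatterns is exactly A's pattern list, character-wise
theorem jobPatterns_eq_map :
    jobPatterns =
      (["/job/", "/jobs/", "/career/", "/careers/",
        "/position/", "/positions/", "/opening/", "/openings/",
        "requisition", "posting", "opportunity"] : List String).map String.toList := by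
  decide

-- ===== VERDICT (by name: the statement is the Claim_ definition above) =====
theorem looks_like_job_url_py_spec : Claim_equal_looks_like_job_url_py := by
  intro url _
  unfold Spec_looks_like_job_url_py looks_like_job_url_py looks_like_job_url_py_alt
  rw [Bool.eq_iff_iff, jobScan_iff]
  simp only [List.any_eq_true]
  constructor
  · rintro ⟨pattern, hmem, hin⟩
    refine ⟨pattern.toList, ?_, ?_⟩
    · rw [jobPatterns_eq_map]; exact List.mem_map_of_mem hmem
    · have h : PySem.Chars.isIn pattern.toList (PySem.Chars.lower url.toList) = true := by
        simpa [pysem, PySem.Str.lower] using hin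
      exact (PySem.Chars.exists_prefix_drop_iff_isIn _ _).mpr h
  · rintro ⟨p, hp, j, hj⟩
    rw [jobPatterns_eq_map] at hp
    obtain ⟨s, hs, rfl⟩ := List.mem_map.mp hp
    refine ⟨s, hs, ?_⟩
    have h : PySem.Chars.isIn s.toList (PySem.Chars.lower url.toList) = true :=
      (PySem.Chars.exists_prefix_drop_iff_isIn _ _).mp ⟨j, hj⟩
    simpa [pysem, PySem.Str.lower] using h
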